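-- pv_equiv track=rewrite | github.com/touge13/Algorithms | TrainingAlgorithms6.0/2 (полный балл)/E.py | removing_medians
-- ===== SOURCE A (Python) =====
-- def removing_medians(n, nums):
--     nums.sort()
--     res = []
--     r = n // 2      # pointer for even case
--     l = n // 2 - 1  # pointer for odd case
--     parity = n % 2
--
--     while l >= 0 and r < n:
--         if parity == 0:
--             res.append(nums[l])
--             l -= 1
--             parity = 1
--         else:
--             res.append(nums[r])
--             r += 1
--             parity = 0
--
--     # эти два цикла итерируются один раз, и то только в случае,
--     # если четность массива - нечетна, можно было их разместить
--     # в первом цикле (выше), либо использовать if.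
--     # В общем, не очень красиво, но оставлю как есть, ибо жмут дедлайны
--     while l >= 0:
--         res.append(nums[l])
--         l -= 1
--
--     while r < n:
--         res.append(nums[r])
--         r += 1
--
--     return res
-- ===== SOURCE B (Python) =====
-- def removing_medians(n, nums):
--     nums.sort()
--     if n <= 0:
--         return []
--     h = n // 2
--     left = nums[:h][::-1]     # values below the median, descending away from it
--     right = nums[h:n]         # median (odd n) and values above, ascending
--     res = []
--     if n % 2:
--         res.append(right[0])
--         right = right[1:]
--     for a, b in zip(left, right):
--         res.append(a)
--         res.append(b)
--     return res
-- ===== Notes on version B (the rewrite author's own statement) =====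
-- stated objective: simpler
-- what changed: Replaced the three index-pointer while-loops with a slice-based decomposition: split the sorted list at n//2 into a reversed lower half and an upper half, emit the median first when n is odd, then interleave the two halves with zip.
import Mathlib
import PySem

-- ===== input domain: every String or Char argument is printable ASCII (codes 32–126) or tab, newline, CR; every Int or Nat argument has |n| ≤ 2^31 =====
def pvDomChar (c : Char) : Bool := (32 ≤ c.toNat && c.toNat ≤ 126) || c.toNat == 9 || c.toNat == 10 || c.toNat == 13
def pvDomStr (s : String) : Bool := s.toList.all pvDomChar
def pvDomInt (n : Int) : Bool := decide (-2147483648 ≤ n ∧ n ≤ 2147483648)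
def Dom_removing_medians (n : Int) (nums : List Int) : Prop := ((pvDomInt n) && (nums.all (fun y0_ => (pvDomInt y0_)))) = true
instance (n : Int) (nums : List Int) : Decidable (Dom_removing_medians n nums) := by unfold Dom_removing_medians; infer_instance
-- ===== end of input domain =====

-- B replaces A's three index-pointer while-loops with a slice decomposition (reversed lower
-- half / upper half interleaved by zip) for simplicity; both sort nums in place in Python,
-- the equivalence proved here is about the return value.


-- ===== PORT A =====
-- main while-loop of A: alternates between the left pointer l (descending) and the right
-- pointer r (ascending) according to parity; returns the accumulated res and final l, r.
-- nums[l] / nums[r] is pyGet? with default 0; the default is only reached when Python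
-- would raise IndexError (n > len nums), which Pre_ excludes.
def rmLoopMain (n : Int) (s : List Int) (l r parity : Int) (res : List Int) :
    List Int × Int × Int :=
  if l ≥ 0 ∧ r < n then
    if parity = 0 then
      rmLoopMain n s (l - 1) r 1 (res ++ [(PySem.List.pyGet? s l).getD 0])
    else
      rmLoopMain n s l (r + 1) 0 (res ++ [(PySem.List.pyGet? s r).getD 0])
  else (res, l, r)
termination_by ((l + 1) + (n - r)).toNat
decreasing_by all_goals omega

-- second while-loop of A: drain the left pointer
def rmLoopL (s : List Int) (l : Int) (res : List Int) : List Int :=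
  if l ≥ 0 then rmLoopL s (l - 1) (res ++ [(PySem.List.pyGet? s l).getD 0]) else res
termination_by (l + 1).toNat
decreasing_by omega

-- third while-loop of A: drain the right pointer
def rmLoopR (n : Int) (s : List Int) (r : Int) (res : List Int) : List Int :=
  if r < n then rmLoopR n s (r + 1) (res ++ [(PySem.List.pyGet? s r).getD 0]) else res
termination_by (n - r).toNat
decreasing_by omega

def removing_medians (n : Int) (nums : List Int) : List Int :=
  let s := PySem.List.sorted nums (fun x : Int => x) false
  let h := PySem.Int.floordiv n 2
  let (res, l, r) := rmLoopMain n s (h - 1) h (PySem.Int.mod n 2) []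
  rmLoopR n s r (rmLoopL s l res)

-- ===== PORT B =====
def removing_medians_alt (n : Int) (nums : List Int) : List Int :=
  let s := PySem.List.sorted nums (fun x : Int => x) false
  if n ≤ 0 then []
  else
    let h := PySem.Int.floordiv n 2
    let left := (PySem.List.slice s none (some h)).reverse
    let right := PySem.List.slice s (some h) (some n)
    -- if n % 2: res starts with right[0] and right loses its head
    let (res, right') : List Int × List Int :=
      if PySem.Int.mod n 2 ≠ 0 then ([(PySem.List.pyGet? right 0).getD 0], right.drop 1)
      else ([], right)
    res ++ (left.zip right').flatMap (fun p => [p.1, p.2])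

-- ===== PRECONDITION & SPEC =====
-- Pre_ excludes exactly the inputs where Python A raises IndexError: when n exceeds
-- the length of nums, A's pointers index past the end of the list.
def Pre_removing_medians (n : Int) (nums : List Int) : Prop := n ≤ nums.length
instance (n : Int) (nums : List Int) : Decidable (Pre_removing_medians n nums) := by
  unfold Pre_removing_medians; infer_instance
def pvWitness_removing_medians : Int × List Int := (5, [3, -1, 4, 1, 5])

def Spec_removing_medians (n : Int) (nums : List Int) (out : List Int) : Prop := out = removing_medians_alt n nums
instance (n : Int) (nums : List Int) (out : List Int) : Decidable (Spec_removing_medians n nums out) := by unfold Spec_removing_medians; infer_instance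

-- ===== CLAIM (what is proved, stated in full; the proofs are below) =====
def Claim_equal_removing_medians : Prop := ∀ (n : Int) (nums : List Int), Dom_removing_medians n nums → Pre_removing_medians n nums → Spec_removing_medians n nums (removing_medians n nums)

-- ===== LEMMAS AND PROOFS =====

-- the descending value sequence s[l], s[l-1], ..., s[0]
def rmDesc (s : List Int) (l : Int) : List Int :=
  if l ≥ 0 then (PySem.List.pyGet? s l).getD 0 :: rmDesc s (l - 1) else []
termination_by (l + 1).toNat
decreasing_by omega

-- the ascending value sequence s[r], s[r+1], ..., s[n-1]
def rmAsc (n : Int) (s : List Int) (r : Int) : List Int :=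
  if r < n then (PySem.List.pyGet? s r).getD 0 :: rmAsc n s (r + 1) else []
termination_by (n - r).toNat
decreasing_by omega

def rmInterleave : List Int → List Int → List Int
  | [], ys => ys
  | x :: xs, ys => x :: rmInterleave ys xs
termination_by xs ys => xs.length + ys.length
decreasing_by simp; omega

theorem rmInterleave_nil (ys : List Int) : rmInterleave [] ys = ys := by
  rw [rmInterleave]

theorem rmInterleave_cons (x : Int) (xs ys : List Int) :
    rmInterleave (x :: xs) ys = x :: rmInterleave ys xs := by
  rw [rmInterleave]

theorem rmInterleave_nil_right (xs : List Int) : rmInterleave xs [] = xs := by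
  match xs with
  | [] => rw [rmInterleave]
  | x :: xs => rw [rmInterleave_cons, rmInterleave_nil]

theorem rmLoopL_eq (s : List Int) (l : Int) (res : List Int) :
    rmLoopL s l res = res ++ rmDesc s l := by
  fun_induction rmLoopL s l res with
  | case1 l res h ih => rw [rmDesc, if_pos h, ih]; simp
  | case2 l res h => rw [rmDesc, if_neg h]; simp

theorem rmLoopR_eq (n : Int) (s : List Int) (r : Int) (res : List Int) :
    rmLoopR n s r res = res ++ rmAsc n s r := by
  fun_induction rmLoopR n s r res with
  | case1 r res h ih => rw [rmAsc, if_pos h, ih]; simp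
  | case2 r res h => rw [rmAsc, if_neg h]; simp

-- the composite of the three loops of A is an interleaving (first pick by parity)
theorem rmFull_eq (n : Int) (s : List Int) (l r parity : Int) (res : List Int) :
    rmLoopR n s (rmLoopMain n s l r parity res).2.2
      (rmLoopL s (rmLoopMain n s l r parity res).2.1 (rmLoopMain n s l r parity res).1) =
      res ++ (if parity = 0 then rmInterleave (rmDesc s l) (rmAsc n s r)
              else rmInterleave (rmAsc n s r) (rmDesc s l)) := by
  fun_induction rmLoopMain n s l r parity res with
  | case1 l r res hc ih =>
    have hd : rmDesc s l = (PySem.List.pyGet? s l).getD 0 :: rmDesc s (l - 1) := by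
      rw [rmDesc, if_pos hc.1]
    rw [ih, hd, rmInterleave_cons]
    simp
  | case2 l r parity res hc hp ih =>
    have ha : rmAsc n s r = (PySem.List.pyGet? s r).getD 0 :: rmAsc n s (r + 1) := by
      rw [rmAsc, if_pos hc.2]
    rw [ih, if_neg hp, ha, rmInterleave_cons]
    simp
  | case3 l r parity res hc =>
    show rmLoopR n s r (rmLoopL s l res) = _
    rw [rmLoopL_eq, rmLoopR_eq]
    have hl : ¬ l ≥ 0 ∨ ¬ r < n := by omega
    rcases hl with hl | hr
    · rw [rmDesc, if_neg hl]
      simp [rmInterleave_nil, rmInterleave_nil_right]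
    · rw [rmAsc, if_neg hr]
      simp [rmInterleave_nil, rmInterleave_nil_right]

-- zip-and-flatten of two equal-length lists is their interleaving
theorem rmZip_eq (xs ys : List Int) (h : xs.length = ys.length) :
    (xs.zip ys).flatMap (fun p => [p.1, p.2]) = rmInterleave xs ys := by
  induction xs generalizing ys with
  | nil => cases ys with
    | nil => rw [rmInterleave_nil]; rfl
    | cons y ys => simp at h
  | cons x xs ih => cases ys with
    | nil => simp at h
    | cons y ys =>
      simp only [List.zip_cons_cons, List.flatMap_cons]
      rw [rmInterleave_cons, rmInterleave_cons, ← ih ys (by simpa using h)]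
      rfl

-- rmDesc over a valid range is the reversed prefix
theorem rmDesc_eq (s : List Int) (l : Int) (hl : l < s.length) :
    rmDesc s l = (s.take (l + 1).toNat).reverse := by
  revert hl
  fun_induction rmDesc s l with
  | case1 l h ih =>
    intro hl
    have hlt : l.toNat < s.length := by omega
    have hg : PySem.List.pyGet? s l = some s[l.toNat] := by
      rw [PySem.List.pyGet?_of_nonneg s h]
      simp [List.getElem?_eq_getElem hlt]
    rw [hg, Option.getD_some, ih (by omega)]
    have h1 : (l + 1).toNat = l.toNat + 1 := by omega
    have h2 : (l - 1 + 1).toNat = l.toNat := by omega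
    rw [h1, h2, List.take_add_one, List.getElem?_eq_getElem hlt]
    rw [Option.toList_some, List.reverse_append]
    rfl
  | case2 l h =>
    intro _
    have : (l + 1).toNat = 0 := by omega
    simp [this]

-- rmAsc over a valid range is the segment s[r:n]
theorem rmAsc_eq (n : Int) (s : List Int) (r : Int) (hr : 0 ≤ r) (hn : n ≤ s.length) :
    rmAsc n s r = (s.take n.toNat).drop r.toNat := by
  by_cases hlt : r < n
  · have hfuel : ∃ k : Nat, (n - r).toNat = k := ⟨(n - r).toNat, rfl⟩
    obtain ⟨k, hk⟩ := hfuel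
    induction k generalizing r with
    | zero => omega
    | succ k ih =>
      rw [rmAsc, if_pos hlt]
      have hrl : r.toNat < s.length := by omega
      have hg : PySem.List.pyGet? s r = some s[r.toNat] := by
        rw [PySem.List.pyGet?_of_nonneg s hr]
        simp [List.getElem?_eq_getElem hrl]
      rw [hg, Option.getD_some]
      by_cases hlt2 : r + 1 < n
      · rw [ih (r + 1) (by omega) hlt2 (by omega)]
        have h1 : (r + 1).toNat = r.toNat + 1 := by omega
        rw [h1]
        symm
        rw [List.drop_eq_getElem_cons (by simp; omega)]
        simp [List.getElem_take]
      · rw [rmAsc, if_neg hlt2]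
        rw [List.drop_eq_getElem_cons (by simp; omega), List.drop_eq_nil_of_le (by simp; omega)]
        simp [List.getElem_take]
  · rw [rmAsc, if_neg hlt, List.drop_eq_nil_of_le]
    simp
    omega

theorem removing_medians_spec : Claim_equal_removing_medians := by
  intro n nums _ hpre
  unfold Spec_removing_medians removing_medians removing_medians_alt
  unfold Pre_removing_medians at hpre
  set s := PySem.List.sorted nums (fun x : Int => x) false with hs
  have hlen : s.length = nums.length := by
    rw [hs]; exact PySem.List.length_sorted nums (fun x : Int => x) false
  have hfd : PySem.Int.floordiv n 2 = n / 2 :=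
    PySem.Int.floordiv_eq_ediv_of_pos (by omega)
  have hmd : PySem.Int.mod n 2 = n % 2 :=
    PySem.Int.mod_eq_emod_of_pos (by omega)
  simp only [hfd, hmd]
  rw [rmFull_eq]
  by_cases hn : n ≤ 0
  · -- A's main loop never runs: l = n/2 - 1 < 0 ends desc immediately,
    -- and r = n/2 ≥ n ends asc immediately
    rw [if_pos hn]
    have hd : rmDesc s (n / 2 - 1) = [] := by rw [rmDesc, if_neg (by omega)]
    have ha : rmAsc n s (n / 2) = [] := by rw [rmAsc, if_neg (by omega)]
    rw [hd, ha]
    split <;> simp [rmInterleave_nil_right]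
  · rw [if_neg hn]
    have hn0 : 0 < n := by omega
    have hh0 : 0 ≤ n / 2 := by omega
    have hhn : n / 2 < n := by omega
    have hnl : n ≤ s.length := by omega
    -- identify the slices
    have hslice1 : PySem.List.slice s none (some (n / 2)) = s.take (n / 2).toNat := by
      obtain ⟨a, ha⟩ : ∃ a : Nat, n / 2 = (a : Int) := ⟨(n / 2).toNat, by omega⟩
      rw [ha, PySem.List.slice_to_natCast]
      simp
    have hslice2 : PySem.List.slice s (some (n / 2)) (some n) =
        (s.take n.toNat).drop (n / 2).toNat := by
      obtain ⟨a, ha⟩ : ∃ a : Nat, n / 2 = (a : Int) := ⟨(n / 2).toNat, by omega⟩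
      obtain ⟨b, hb⟩ : ∃ b : Nat, n = (b : Int) := ⟨n.toNat, by omega⟩
      rw [ha, hb, PySem.List.slice_natCast, List.drop_take]
      have h1 : ((a : Int)).toNat = a := by omega
      have h2 : ((b : Int)).toNat = b := by omega
      rw [h1, h2]
    rw [hslice1, hslice2]
    have hdesc : rmDesc s (n / 2 - 1) = (s.take (n / 2).toNat).reverse := by
      rw [rmDesc_eq s _ (by omega)]
      congr 2
      omega
    have hasc : rmAsc n s (n / 2) = (s.take n.toNat).drop (n / 2).toNat :=
      rmAsc_eq n s _ hh0 hnl
    have hlenL : (s.take (n / 2).toNat).reverse.length = (n / 2).toNat := by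
      simp; omega
    have hlenR : ((s.take n.toNat).drop (n / 2).toNat).length =
        n.toNat - (n / 2).toNat := by
      simp; omega
    by_cases hpar : n % 2 = 0
    · -- even n: interleave starting from the left half
      rw [if_pos hpar, if_neg (by omega)]
      rw [hdesc, hasc]
      rw [rmZip_eq _ _ (by rw [hlenL, hlenR]; omega)]
    · -- odd n: median first, then interleave
      rw [if_neg hpar, if_pos (by omega : n % 2 ≠ 0)]
      set R := (s.take n.toNat).drop (n / 2).toNat with hR
      have hRlen : R.length = n.toNat - (n / 2).toNat := hlenR
      have hRne : R ≠ [] := by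
        intro h; rw [h] at hRlen; simp at hRlen; omega
      obtain ⟨m, R', hRm⟩ := List.exists_cons_of_ne_nil hRne
      rw [hasc, hRm, rmInterleave_cons, hdesc]
      have hm : (PySem.List.pyGet? (m :: R') 0).getD 0 = m := by
        rw [PySem.List.pyGet?_zero_cons]; rfl
      rw [hm]
      show [] ++ m :: rmInterleave (List.take (n / 2).toNat s).reverse R' =
          [m] ++ List.flatMap (fun p => [p.1, p.2]) ((List.take (n / 2).toNat s).reverse.zip R')
      rw [rmZip_eq _ _ ?_]
      · simp
      · rw [hlenL]
        have h3 := hRlen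
        rw [hRm] at h3
        simp at h3
        omega
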